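-- pv_equiv track=rewrite | github.com/vyalsgh-tech/my-timetable-next | tools/step94_web_viewer_header_theme_refine.py | insertion_index_after_imports
-- ===== SOURCE A (Python) =====
-- def insertion_index_after_imports(text: str) -> int:
--     lines = text.splitlines(True)
--     last_import = -1
--     for i, line in enumerate(lines[:200]):
--         s = line.strip()
--         if s.startswith('import ') or s.startswith('from '):
--             last_import = i
--     if last_import >= 0:
--         return sum(len(x) for x in lines[:last_import + 1])
--     return 0
-- ===== SOURCE B (Python) =====
-- def insertion_index_after_imports(text: str) -> int:
--     offset = 0
--     result = 0
--     for line in text.splitlines(True)[:200]: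
--         offset += len(line)
--         s = line.strip()
--         if s.startswith('import ') or s.startswith('from '):
--             result = offset
--     return result
-- ===== Notes on version B (the rewrite author's own statement) =====
-- stated objective: simpler
-- what changed: A makes two passes (find the last import line's index with a -1 sentinel, then re-sum the lengths of that prefix); B is a single scan carrying a running character offset and recording it whenever an import line is seen, with 0 as the natural no-import default.
import Mathlib
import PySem

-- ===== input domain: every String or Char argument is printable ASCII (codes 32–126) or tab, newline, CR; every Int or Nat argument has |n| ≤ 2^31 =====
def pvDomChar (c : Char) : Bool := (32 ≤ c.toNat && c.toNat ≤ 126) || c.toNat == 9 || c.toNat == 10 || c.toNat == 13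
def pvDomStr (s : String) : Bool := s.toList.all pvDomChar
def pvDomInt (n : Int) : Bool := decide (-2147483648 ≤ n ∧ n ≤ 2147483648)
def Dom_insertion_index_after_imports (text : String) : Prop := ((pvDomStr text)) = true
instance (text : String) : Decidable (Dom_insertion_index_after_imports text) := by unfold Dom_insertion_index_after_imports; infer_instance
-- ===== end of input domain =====

-- B replaces A's two passes (locate the last import line, then re-sum that prefix's lengths)
-- by a single scan carrying a running offset; same return value is proved for every string.

-- str.splitlines(True) (keepends) by hand; exact on Dom, where the only line breaks are '\n', '\r', '\r\n'
def pvSplitlinesKeep (cur : List Char) : List Char → List (List Char)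
  | [] => if cur = [] then [] else [cur.reverse]
  | '\r' :: '\n' :: t => (cur.reverse ++ ['\r', '\n']) :: pvSplitlinesKeep [] t
  | c :: t =>
      if c = '\n' ∨ c = '\r' then (cur.reverse ++ [c]) :: pvSplitlinesKeep [] t
      else pvSplitlinesKeep (c :: cur) t

-- ===== PORT A =====
def insertion_index_after_imports (text : String) : Int :=
  let lines := pvSplitlinesKeep [] text.toList
  let last_import :=
    (PySem.List.enumerate (PySem.List.slice lines none (some 200)) 0).foldl
      (fun acc p =>
        let s := PySem.Chars.strip p.2
        if PySem.Chars.startswith s "import ".toList || PySem.Chars.startswith s "from ".toList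
        then p.1 else acc) (-1)
  if last_import ≥ 0 then
    ((PySem.List.slice lines none (some (last_import + 1))).map (fun x => (x.length : Int))).sum
  else 0

-- ===== PORT B =====
def insertion_index_after_imports_alt (text : String) : Int :=
  let r := (PySem.List.slice (pvSplitlinesKeep [] text.toList) none (some 200)).foldl
    (fun (st : Int × Int) line =>
      let off := st.1 + (line.length : Int)
      let s := PySem.Chars.strip line
      (off, if PySem.Chars.startswith s "import ".toList || PySem.Chars.startswith s "from ".toList
            then off else st.2))
    (0, 0)
  r.2

-- ===== PRECONDITION & SPEC =====
def Spec_insertion_index_after_imports (text : String) (out : Int) : Prop := out = insertion_index_after_imports_alt text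
instance (text : String) (out : Int) : Decidable (Spec_insertion_index_after_imports text out) := by unfold Spec_insertion_index_after_imports; infer_instance

-- ===== CLAIM (what is proved, stated in full; the proofs are below) =====
def Claim_equal_insertion_index_after_imports : Prop := ∀ (text : String), Dom_insertion_index_after_imports text → Spec_insertion_index_after_imports text (insertion_index_after_imports text)

-- ===== LEMMAS AND PROOFS =====

-- the import-line test shared by both loops
def pvPred (l : List Char) : Bool :=
  let s := PySem.Chars.strip l
  PySem.Chars.startswith s "import ".toList || PySem.Chars.startswith s "from ".toList

-- index of the last pred-satisfying line (meaningful only when one exists)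
def pvLast : List (List Char) → Nat
  | [] => 0
  | _ :: t => if t.any pvPred then pvLast t + 1 else 0

-- total length of the prefix ending at the last pred-satisfying line (0 if none)
def pvSumTo : List (List Char) → Int
  | [] => 0
  | l :: t => if t.any pvPred then (l.length : Int) + pvSumTo t
              else (if pvPred l then (l.length : Int) else 0)

theorem pvLast_lt (L : List (List Char)) (h : L.any pvPred = true) : pvLast L < L.length := by
  induction L with
  | nil => simp at h
  | cons l t ih =>
    simp only [pvLast, List.length_cons]
    by_cases ht : t.any pvPred = true
    · simp only [ht, if_true]; have := ih ht; omega
    · simp only [ht, if_false, Bool.false_eq_true]; omega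

theorem pvEnumFold (L : List (List Char)) : ∀ (k : Int) (acc : Int),
    (PySem.List.enumerate L k).foldl
      (fun acc p =>
        let s := PySem.Chars.strip p.2
        if PySem.Chars.startswith s "import ".toList || PySem.Chars.startswith s "from ".toList
        then p.1 else acc) acc
    = if L.any pvPred then k + (pvLast L : Int) else acc := by
  induction L with
  | nil => intro k acc; simp [PySem.List.enumerate_nil]
  | cons l t ih =>
    intro k acc
    rw [PySem.List.enumerate_cons, List.foldl_cons, ih]
    simp only [List.any_cons, pvLast, pvPred]
    by_cases ht : t.any pvPred = true
    · simp only [ht, if_true, Bool.or_true]; push_cast; ring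
    · simp only [ht, if_false, Bool.or_false, Bool.false_eq_true]
      split_ifs <;> simp

theorem pvSumTake (L : List (List Char)) (h : L.any pvPred = true) :
    ((L.take (pvLast L + 1)).map (fun x => (x.length : Int))).sum = pvSumTo L := by
  induction L with
  | nil => simp at h
  | cons l t ih =>
    simp only [pvLast, pvSumTo]
    by_cases ht : t.any pvPred = true
    · simp only [ht, if_true, List.take_succ_cons, List.map_cons, List.sum_cons, ih ht]
    · simp only [List.any_cons] at h
      have hl : pvPred l = true := by
        rcases Bool.or_eq_true .. |>.mp h with h' | h'
        · exact h'
        · exact absurd h' (by simp [ht])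
      simp [ht, hl]

theorem pvBFold (L : List (List Char)) : ∀ (off res : Int),
    (L.foldl
      (fun (st : Int × Int) line =>
        let off := st.1 + (line.length : Int)
        let s := PySem.Chars.strip line
        (off, if PySem.Chars.startswith s "import ".toList || PySem.Chars.startswith s "from ".toList
              then off else st.2))
      (off, res)).2
    = if L.any pvPred then off + pvSumTo L else res := by
  induction L with
  | nil => intro off res; simp
  | cons l t ih =>
    intro off res
    rw [List.foldl_cons]
    simp only
    rw [ih]
    simp only [List.any_cons, pvSumTo, pvPred]
    by_cases ht : t.any pvPred = true
    · simp only [ht, if_true, Bool.or_true]; ring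
    · simp only [ht, if_false, Bool.or_false, Bool.false_eq_true]
      split_ifs with h₁ <;> simp_all

-- ===== VERDICT (by name: the statement is the Claim_ definition above) =====
theorem insertion_index_after_imports_spec : Claim_equal_insertion_index_after_imports := by
  intro text _
  unfold Spec_insertion_index_after_imports insertion_index_after_imports insertion_index_after_imports_alt
  set lines := pvSplitlinesKeep [] text.toList with hlines
  have hsl : PySem.List.slice lines none (some 200) = lines.take 200 := by
    rw [show (200 : Int) = ((200 : Nat) : Int) from rfl, PySem.List.slice_to_natCast]
  set L := lines.take 200 with hL
  simp only [hsl]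
  rw [pvEnumFold, pvBFold]
  by_cases h : L.any pvPred = true
  · have hlt : pvLast L < L.length := pvLast_lt L h
    have hlen : L.length ≤ 200 := by rw [hL]; exact (List.length_take_le _ _)
    simp only [h, if_true]
    have hge : (0 : Int) + (pvLast L : Int) ≥ 0 := by positivity
    rw [if_pos hge]
    have hb : (0 : Int) + (pvLast L : Int) + 1 = ((pvLast L + 1 : Nat) : Int) := by push_cast; ring
    rw [hb, PySem.List.slice_to_natCast]
    have hmin : min (pvLast L + 1) 200 = pvLast L + 1 := by omega
    have htk : lines.take (pvLast L + 1) = L.take (pvLast L + 1) := by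
      conv_rhs => rw [hL]
      rw [List.take_take, hmin]
    rw [htk, pvSumTake L h]
    ring
  · simp [h]
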